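-- pv_equiv track=rewrite | github.com/humancipher/Programming_Contest | Programming_Contest/AtCoder/other/dwango2015-prelims/dwango2015-prelims_B.py | cont_25
-- ===== SOURCE A (Python) =====
-- def cont_25(list_25):
--     list_25_cont = []
--     pt,cont = 0,1
--     while pt < len(list_25)-1:
--         if list_25[pt]+2 == list_25[pt+1]:
--             cont += 1
--         else:
--             list_25_cont.append(cont)
--             cont = 1
--         pt += 1
--     if len(list_25) > 0:
--         list_25_cont.append(cont)
--     return list_25_cont
-- ===== SOURCE B (Python) =====
-- def cont_25(list_25):
--     if not list_25:
--         return []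
--     cuts = [0] + [i + 1 for i, (a, b) in enumerate(zip(list_25, list_25[1:])) if a + 2 != b] + [len(list_25)]
--     return [q - p for p, q in zip(cuts, cuts[1:])]
-- ===== Notes on version B (the rewrite author's own statement) =====
-- stated objective: alternative
-- what changed: Replaces the running-counter/pointer while-loop with a declarative pipeline: build the table of cut positions (start, each break index i+1 where list[i]+2 != list[i+1], end) and return the successive differences of that table.
import Mathlib
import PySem

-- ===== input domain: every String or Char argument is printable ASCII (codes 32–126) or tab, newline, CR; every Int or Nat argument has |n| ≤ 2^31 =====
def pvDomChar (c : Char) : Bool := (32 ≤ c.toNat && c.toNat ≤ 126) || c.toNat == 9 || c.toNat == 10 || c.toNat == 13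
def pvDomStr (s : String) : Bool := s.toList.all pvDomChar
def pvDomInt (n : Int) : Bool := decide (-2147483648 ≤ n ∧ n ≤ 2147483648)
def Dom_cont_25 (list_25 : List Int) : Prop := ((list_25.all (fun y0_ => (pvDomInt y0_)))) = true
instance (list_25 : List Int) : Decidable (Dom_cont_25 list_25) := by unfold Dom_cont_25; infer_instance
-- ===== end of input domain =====

-- B replaces A's running-counter while-loop by a cut-position table plus gap differencing (alternative decomposition, same cost).

-- ===== PORT A =====
-- the while-loop of A: state (pt, cont, list_25_cont); returns (list_25_cont, cont) at exit
def contALoop (xs : List Int) (pt : Nat) (cont : Int) (acc : List Int) : List Int × Int :=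
  if pt + 1 < xs.length then    -- pt < len(xs)-1 over Python ints
    if PySem.List.pyGetD xs (pt : Int) 0 + 2 = PySem.List.pyGetD xs ((pt : Int) + 1) 0 then
      contALoop xs (pt + 1) (cont + 1) acc
    else
      contALoop xs (pt + 1) 1 (acc ++ [cont])
  else (acc, cont)
termination_by xs.length - pt

def cont_25 (list_25 : List Int) : List Int :=
  let r := contALoop list_25 0 1 []
  if 0 < list_25.length then r.1 ++ [r.2] else r.1

-- ===== PORT B =====
def cont_25_alt (list_25 : List Int) : List Int :=
  if list_25 = [] then []
  else
    let cuts : List Int :=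
      [0] ++ ((PySem.List.enumerate (list_25.zip (PySem.List.slice list_25 (some 1) none)) 0).filterMap
        (fun p => if p.2.1 + 2 ≠ p.2.2 then some (p.1 + 1) else none)) ++ [(list_25.length : Int)]
    (cuts.zip (PySem.List.slice cuts (some 1) none)).map (fun p => p.2 - p.1)

-- ===== PRECONDITION & SPEC =====
def Spec_cont_25 (list_25 : List Int) (out : List Int) : Prop := out = cont_25_alt list_25
instance (list_25 : List Int) (out : List Int) : Decidable (Spec_cont_25 list_25 out) := by unfold Spec_cont_25; infer_instance

-- ===== CLAIM (what is proved, stated in full; the proofs are below) =====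
def Claim_equal_cont_25 : Prop := ∀ (list_25 : List Int), Dom_cont_25 list_25 → Spec_cont_25 list_25 (cont_25 list_25)

-- ===== LEMMAS AND PROOFS =====

-- common structural description: run lengths of consecutive +2 steps
def pvGo (x : Int) (l : List Int) (c : Int) : List Int :=
  match l with
  | [] => [c]
  | y :: t => if x + 2 = y then pvGo y t (c + 1) else c :: pvGo y t 1

-- structural version of A's loop
def pvSA (x : Int) (l : List Int) (c : Int) (acc : List Int) : List Int × Int :=
  match l with
  | [] => (acc, c)
  | y :: t => if x + 2 = y then pvSA y t (c + 1) acc else pvSA y t 1 (acc ++ [c])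

-- break positions with integer offset (B's middle comprehension)
def pvBr (i : Int) (x : Int) (l : List Int) : List Int :=
  match l with
  | [] => []
  | y :: t => if x + 2 = y then pvBr (i + 1) y t else (i + 1) :: pvBr (i + 1) y t

-- successive differences (B's last comprehension)
def pvDif (l : List Int) : List Int := (l.zip l.tail).map (fun p => p.2 - p.1)

lemma contALoop_eq_sA (xs : List Int) :
    ∀ n pt c acc, xs.length - pt = n → pt < xs.length →
      contALoop xs pt c acc = pvSA (xs.getD pt 0) (xs.drop (pt + 1)) c acc := by
  intro n
  induction n with
  | zero => intro pt c acc hn hpt; omega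
  | succ m ih =>
    intro pt c acc hn hpt
    by_cases h : pt + 1 < xs.length
    · have hdrop : xs.drop (pt + 1) = xs[pt + 1] :: xs.drop (pt + 2) :=
        List.drop_eq_getElem_cons h
      have hg1 : PySem.List.pyGetD xs (pt : Int) 0 = xs.getD pt 0 := by
        simp [PySem.List.pyGetD_natCast]
      have hg2 : PySem.List.pyGetD xs ((pt : Int) + 1) 0 = xs[pt + 1] := by
        have : ((pt : Int) + 1) = ((pt + 1 : Nat) : Int) := by push_cast; ring
        rw [this, PySem.List.pyGetD_natCast, List.getD_eq_getElem _ _ h]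
      rw [contALoop, if_pos h, hg1, hg2, hdrop, pvSA]
      by_cases hc : xs.getD pt 0 + 2 = xs[pt + 1]
      · rw [if_pos hc, if_pos hc, ih (pt + 1) (c + 1) acc (by omega) h,
          List.getD_eq_getElem _ _ h]
      · rw [if_neg hc, if_neg hc, ih (pt + 1) 1 (acc ++ [c]) (by omega) h,
          List.getD_eq_getElem _ _ h]
    · rw [contALoop, if_neg h]
      have : xs.drop (pt + 1) = [] := List.drop_eq_nil_of_le (by omega)
      rw [this, pvSA]

lemma sA_eq_go : ∀ (l : List Int) (x c : Int) (acc : List Int),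
    (pvSA x l c acc).1 ++ [(pvSA x l c acc).2] = acc ++ pvGo x l c := by
  intro l
  induction l with
  | nil => intro x c acc; simp [pvSA, pvGo]
  | cons y t ih =>
    intro x c acc
    by_cases h : x + 2 = y
    · simp [pvSA, pvGo, h, ih]
    · simp [pvSA, pvGo, h, ih, List.append_assoc]

lemma filterMap_enumerate_eq_br : ∀ (l : List Int) (x : Int) (i : Int),
    (PySem.List.enumerate ((x :: l).zip l) i).filterMap
        (fun p => if p.2.1 + 2 ≠ p.2.2 then some (p.1 + 1) else none)
      = pvBr i x l := by
  intro l
  induction l with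
  | nil => intro x i; simp [PySem.List.enumerate_nil, pvBr]
  | cons y t ih =>
    intro x i
    rw [show (x :: y :: t).zip (y :: t) = (x, y) :: (y :: t).zip t from rfl,
      PySem.List.enumerate_cons, List.filterMap_cons, pvBr]
    by_cases h : x + 2 = y
    · simp [h]; simpa using ih y (i + 1)
    · simp [h]; simpa using ih y (i + 1)

lemma dif_cons_cons (a b : Int) (l : List Int) :
    pvDif (a :: b :: l) = (b - a) :: pvDif (b :: l) := by
  simp [pvDif]

lemma dif_br_eq_go : ∀ (l : List Int) (x i c : Int),
    pvDif (c :: (pvBr i x l ++ [i + 1 + (l.length : Int)])) = pvGo x l (i + 1 - c) := by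
  intro l
  induction l with
  | nil => intro x i c; simp [pvBr, pvDif, pvGo]
  | cons y t ih =>
    intro x i c
    by_cases h : x + 2 = y
    · have hlen : i + 1 + ((y :: t).length : Int) = (i + 1) + 1 + (t.length : Int) := by
        push_cast [List.length_cons]; ring
      rw [pvBr, if_pos h, hlen, ih y (i + 1) c, pvGo, if_pos h]
      congr 1; ring
    · have hlen : i + 1 + ((y :: t).length : Int) = (i + 1) + 1 + (t.length : Int) := by
        push_cast [List.length_cons]; ring
      rw [pvBr, if_neg h, List.cons_append, hlen, dif_cons_cons,
        ih y (i + 1) (i + 1), pvGo, if_neg h]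
      norm_num

lemma cont_25_eq_go (x : Int) (l : List Int) : cont_25 (x :: l) = pvGo x l 1 := by
  have h0 : (0 : Nat) < (x :: l).length := by simp
  have := contALoop_eq_sA (x :: l) ((x :: l).length - 0) 0 1 [] rfl h0
  simp only [List.getD] at this
  rw [cont_25]
  simp only [this, if_pos h0]
  simpa using sA_eq_go l x 1 []

lemma cont_25_alt_eq_go (x : Int) (l : List Int) : cont_25_alt (x :: l) = pvGo x l 1 := by
  rw [cont_25_alt, if_neg (by simp)]
  simp only [PySem.List.slice_from_one, List.tail_cons]
  rw [filterMap_enumerate_eq_br l x 0]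
  have : ([0] ++ pvBr 0 x l ++ [(((x :: l).length : Nat) : Int)] : List Int)
      = (0 : Int) :: (pvBr 0 x l ++ [0 + 1 + (l.length : Int)]) := by
    simp [List.length_cons]; ring
  rw [this]
  have := dif_br_eq_go l x 0 0
  simpa [pvDif] using this

-- ===== VERDICT (by name: the statement is the Claim_ definition above) =====
theorem cont_25_spec : Claim_equal_cont_25 := by
  intro xs _
  unfold Spec_cont_25
  cases xs with
  | nil =>
    have h1 : contALoop [] 0 1 [] = ([], 1) := by rw [contALoop]; simp
    simp [cont_25, cont_25_alt, h1]
  | cons x l => rw [cont_25_eq_go, cont_25_alt_eq_go]
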